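-- pv_equiv track=rewrite | github.com/jayantsolanki/EPIJudgePython | epi_judge_python/11-01-search_first_key.py | return_prefix
-- ===== SOURCE A (Python) =====
-- from typing import List
--
-- def return_prefix(A: List[str], p: str):
--     left, mid, right, result = 0, 0, len(A) -1 , -1
--     while left <= right:
--         mid = left + (right - left) // 2
--         if p < A[mid][:len(p)]:
--             right = mid - 1
--         elif p == A[mid][:len(p)]:
--             result =  mid
--             right = mid - 1
--         else:
--             left = mid + 1
--     L = result
--     left, mid, right, result = 0, 0, len(A) -1 , -1
--     while left <= right:
--         mid = left + (right - left) // 2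
--         if p < A[mid][:len(p)]:
--             right = mid - 1
--         elif p == A[mid][:len(p)]:
--             result =  mid
--             left = mid + 1
--         else:
--             left = mid + 1
--     U = result
--
--     return [L, U]
-- ===== SOURCE B (Python) =====
-- def return_prefix(A, p):
--     # single linear pass tracking first and last index whose prefix equals p
--     k = len(p)
--     first = last = -1
--     for i, s in enumerate(A):
--         if s[:k] == p:
--             if first == -1:
--                 first = i
--             last = i
--     return [first, last]
-- ===== Notes on version B (the rewrite author's own statement) =====
-- stated objective: simpler
-- what changed: Replaced the two hand-rolled binary-search while-loops with one linear enumerate pass that tracks the first and last index whose length-len(p) prefix equals p.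
-- outside the precondition, e.g. on return_prefix(['b', 'a'], 'a'): A returns [-1, -1], B returns [1, 1]
import Mathlib
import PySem

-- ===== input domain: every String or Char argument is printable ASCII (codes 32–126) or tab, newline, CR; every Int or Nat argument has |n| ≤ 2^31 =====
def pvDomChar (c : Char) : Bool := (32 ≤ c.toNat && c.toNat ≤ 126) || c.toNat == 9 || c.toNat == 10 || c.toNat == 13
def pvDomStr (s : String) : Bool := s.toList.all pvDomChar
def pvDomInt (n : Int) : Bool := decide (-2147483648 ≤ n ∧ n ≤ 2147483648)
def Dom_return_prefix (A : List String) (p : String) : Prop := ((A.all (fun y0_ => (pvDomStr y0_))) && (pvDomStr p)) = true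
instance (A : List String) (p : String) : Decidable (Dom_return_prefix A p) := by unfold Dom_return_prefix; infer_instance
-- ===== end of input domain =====

-- B replaces A's two hand-rolled binary-search loops with one linear enumerate pass tracking the
-- first and last prefix match (simpler; binary search needs the prefix-sorted precondition anyway).


-- ===== PORT A =====
-- A[mid][:len(p)]  (mid is always in range when the loops probe it; '' default is never read)
def pvKey (A : List String) (p : String) (mid : Int) : String :=
  PySem.Str.slice (PySem.List.pyGetD A mid "") none (some (PySem.Str.len p))

-- mid = left + (right - left) // 2
def pvMid (left right : Int) : Int := left + PySem.Int.floordiv (right - left) 2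

-- first while-loop of A (leftmost occurrence)
def pvLoopL (A : List String) (p : String) (left right result : Int) : Int :=
  if left ≤ right then
    if p < pvKey A p (pvMid left right) then pvLoopL A p left (pvMid left right - 1) result
    else if p = pvKey A p (pvMid left right) then pvLoopL A p left (pvMid left right - 1) (pvMid left right)
    else pvLoopL A p (pvMid left right + 1) right result
  else result
termination_by (right + 1 - left).toNat
decreasing_by
  all_goals
    simp only [pvMid, PySem.Int.floordiv_eq_ediv_of_pos (by omega : (0:Int) < 2)]
    omega

-- second while-loop of A (rightmost occurrence)
def pvLoopU (A : List String) (p : String) (left right result : Int) : Int :=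
  if left ≤ right then
    if p < pvKey A p (pvMid left right) then pvLoopU A p left (pvMid left right - 1) result
    else if p = pvKey A p (pvMid left right) then pvLoopU A p (pvMid left right + 1) right (pvMid left right)
    else pvLoopU A p (pvMid left right + 1) right result
  else result
termination_by (right + 1 - left).toNat
decreasing_by
  all_goals
    simp only [pvMid, PySem.Int.floordiv_eq_ediv_of_pos (by omega : (0:Int) < 2)]
    omega

def return_prefix (A : List String) (p : String) : List Int :=
  [pvLoopL A p 0 ((A.length : Int) - 1) (-1), pvLoopU A p 0 ((A.length : Int) - 1) (-1)]

-- ===== PORT B =====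
def return_prefix_alt (A : List String) (p : String) : List Int :=
  let k := PySem.Str.len p
  let r := (PySem.List.enumerate A 0).foldl
    (fun (acc : Int × Int) (is : Int × String) =>
      if PySem.Str.slice is.2 none (some k) = p then
        ((if acc.1 = -1 then is.1 else acc.1), is.1)
      else acc)
    (-1, -1)
  [r.1, r.2]

-- ===== PRECONDITION & SPEC =====
-- Pre_ restricts to the binary search's natural domain (the judge feeds this function sorted arrays):
-- it excludes inputs whose length-len(p) prefixes are not in nondecreasing order, on which A's binary
-- search still returns a value, but one that depends on its probe sequence and is meaningless.
def Pre_return_prefix (A : List String) (p : String) : Prop :=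
  (A.map (fun s => (PySem.Str.slice s none (some (PySem.Str.len p))).toList)).Pairwise (· ≤ ·)
instance (A : List String) (p : String) : Decidable (Pre_return_prefix A p) := by
  unfold Pre_return_prefix; infer_instance
def pvWitness_return_prefix : List String × String := (["a", "ab", "b"], "a")

def Spec_return_prefix (A : List String) (p : String) (out : List Int) : Prop := out = return_prefix_alt A p
instance (A : List String) (p : String) (out : List Int) : Decidable (Spec_return_prefix A p out) := by unfold Spec_return_prefix; infer_instance

-- ===== CLAIM (what is proved, stated in full; the proofs are below) =====
def Claim_equal_return_prefix : Prop := ∀ (A : List String) (p : String), Dom_return_prefix A p → Pre_return_prefix A p → Spec_return_prefix A p (return_prefix A p)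

-- ===== LEMMAS AND PROOFS =====

-- key of index i (Nat form), and the match predicate
def pvKeyN (A : List String) (p : String) (i : Nat) : String :=
  PySem.Str.slice (A.getD i "") none (some (PySem.Str.len p))

def pvMatch (A : List String) (p : String) (i : Nat) : Prop :=
  i < A.length ∧ pvKeyN A p i = p

def pvIsFirst (A : List String) (p : String) (x : Int) : Prop :=
  (x = -1 ∧ ∀ i, ¬ pvMatch A p i) ∨
  (∃ j, pvMatch A p j ∧ x = (j : Int) ∧ ∀ i, pvMatch A p i → j ≤ i)

def pvIsLast (A : List String) (p : String) (x : Int) : Prop :=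
  (x = -1 ∧ ∀ i, ¬ pvMatch A p i) ∨
  (∃ j, pvMatch A p j ∧ x = (j : Int) ∧ ∀ i, pvMatch A p i → i ≤ j)

theorem pvKey_eq_keyN (A : List String) (p : String) (m : Int)
    (h0 : 0 ≤ m) (h1 : m < (A.length : Int)) : pvKey A p m = pvKeyN A p m.toNat := by
  unfold pvKey pvKeyN
  rw [PySem.List.pyGetD_eq_getElem A "" h0 h1,
      List.getD_eq_getElem A "" (by omega : m.toNat < A.length)]

theorem pvKeyN_mono (A : List String) (p : String) (hpre : Pre_return_prefix A p)
    {i j : Nat} (hij : i ≤ j) (hj : j < A.length) :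
    (pvKeyN A p i).toList ≤ (pvKeyN A p j).toList := by
  rcases Nat.lt_or_ge i j with h | h
  · have hi : i < A.length := Nat.lt_trans h hj
    unfold Pre_return_prefix at hpre
    rw [List.pairwise_iff_getElem] at hpre
    have hmono := hpre i j (by simpa using hi) (by simpa using hj) h
    rw [List.getElem_map, List.getElem_map] at hmono
    unfold pvKeyN
    rw [List.getD_eq_getElem A "" hi, List.getD_eq_getElem A "" hj]
    exact hmono
  · have : i = j := Nat.le_antisymm hij h
    subst this; exact le_refl _

theorem pvMid_bounds {l r : Int} (h : l ≤ r) : l ≤ pvMid l r ∧ pvMid l r ≤ r := by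
  unfold pvMid
  rw [PySem.Int.floordiv_eq_ediv_of_pos (by omega : (0:Int) < 2)]
  omega

theorem pvDoneL (A : List String) (p : String) {l r res : Int} (hlr : ¬ l ≤ r)
    (hres : res = -1 ∨ ∃ j, pvMatch A p j ∧ res = (j : Int) ∧ r < res)
    (hcov : ∀ i, pvMatch A p i → (l ≤ (i : Int) ∧ (i : Int) ≤ r) ∨ (res ≠ -1 ∧ res ≤ (i : Int))) :
    pvIsFirst A p res := by
  rcases hres with h | ⟨j, hj, hje, hjr⟩
  · left
    refine ⟨h, fun i hi => ?_⟩
    rcases hcov i hi with ⟨h1, h2'⟩ | ⟨hne, _⟩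
    · omega
    · exact hne h
  · right
    refine ⟨j, hj, hje, fun i hi => ?_⟩
    rcases hcov i hi with ⟨h1, h2'⟩ | ⟨_, hle⟩
    · omega
    · omega

theorem pvDoneU (A : List String) (p : String) {l r res : Int} (hlr : ¬ l ≤ r)
    (hres : res = -1 ∨ ∃ j, pvMatch A p j ∧ res = (j : Int) ∧ res < l)
    (hcov : ∀ i, pvMatch A p i → (l ≤ (i : Int) ∧ (i : Int) ≤ r) ∨ (res ≠ -1 ∧ (i : Int) ≤ res)) :
    pvIsLast A p res := by
  rcases hres with h | ⟨j, hj, hje, hjr⟩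
  · left
    refine ⟨h, fun i hi => ?_⟩
    rcases hcov i hi with ⟨h1, h2'⟩ | ⟨hne, _⟩
    · omega
    · exact hne h
  · right
    refine ⟨j, hj, hje, fun i hi => ?_⟩
    rcases hcov i hi with ⟨h1, h2'⟩ | ⟨_, hle⟩
    · omega
    · omega

theorem pvLoopL_ind (A : List String) (p : String) (hpre : Pre_return_prefix A p) :
    ∀ (n : Nat) (l r res : Int), (r + 1 - l).toNat ≤ n → 0 ≤ l → r < (A.length : Int) →
    (res = -1 ∨ ∃ j, pvMatch A p j ∧ res = (j : Int) ∧ r < res) →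
    (∀ i, pvMatch A p i → (l ≤ (i : Int) ∧ (i : Int) ≤ r) ∨ (res ≠ -1 ∧ res ≤ (i : Int))) →
    pvIsFirst A p (pvLoopL A p l r res) := by
  intro n
  induction n with
  | zero =>
    intro l r res hn hl hr hres hcov
    have hlr : ¬ l ≤ r := by omega
    rw [pvLoopL, if_neg hlr]
    exact pvDoneL A p hlr hres hcov
  | succ n ih =>
    intro l r res hn hl hr hres hcov
    rw [pvLoopL]
    by_cases hlr : l ≤ r
    · rw [if_pos hlr]
      have hmid := pvMid_bounds hlr
      have hmid0 : 0 ≤ pvMid l r := by omega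
      have hmidn : pvMid l r < (A.length : Int) := by omega
      have hkey : pvKey A p (pvMid l r) = pvKeyN A p (pvMid l r).toNat :=
        pvKey_eq_keyN A p (pvMid l r) hmid0 hmidn
      by_cases hlt : p < pvKey A p (pvMid l r)
      · rw [if_pos hlt]
        refine ih l (pvMid l r - 1) res (by omega) hl (by omega) ?_ ?_
        · rcases hres with h | ⟨j, hj, hje, hjr⟩
          · exact Or.inl h
          · exact Or.inr ⟨j, hj, hje, by omega⟩
        · intro i hi
          rcases hcov i hi with ⟨h1, h2'⟩ | h
          · left
            refine ⟨h1, ?_⟩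
            by_contra hc
            have hmi : (pvMid l r).toNat ≤ i := by omega
            have hle : (pvKeyN A p (pvMid l r).toNat).toList ≤ p.toList :=
              (pvKeyN_mono A p hpre hmi hi.1).trans (le_of_eq (congrArg String.toList hi.2))
            rw [hkey, String.lt_iff_toList_lt] at hlt
            exact absurd (lt_of_lt_of_le hlt hle) (lt_irrefl p.toList)
          · exact Or.inr h
      · rw [if_neg hlt]
        by_cases heq : p = pvKey A p (pvMid l r)
        · rw [if_pos heq]
          have hmatch : pvMatch A p (pvMid l r).toNat := ⟨by omega, by rw [← hkey, ← heq]⟩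
          refine ih l (pvMid l r - 1) (pvMid l r) (by omega) hl (by omega) ?_ ?_
          · exact Or.inr ⟨(pvMid l r).toNat, hmatch, by omega, by omega⟩
          · intro i hi
            rcases hcov i hi with ⟨h1, h2'⟩ | ⟨hne, hle⟩
            · rcases Int.lt_or_le ((i : Int)) (pvMid l r) with hc | hc
              · exact Or.inl ⟨h1, by omega⟩
              · exact Or.inr ⟨by omega, hc⟩
            · right
              constructor
              · omega
              · rcases hres with h | ⟨j, hj, hje, hjr⟩
                · omega
                · omega
        · rw [if_neg heq]
          have hklt : pvKey A p (pvMid l r) < p :=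
            lt_of_le_of_ne (not_lt.mp hlt) (fun h => heq h.symm)
          refine ih (pvMid l r + 1) r res (by omega) (by omega) hr hres ?_
          intro i hi
          rcases hcov i hi with ⟨h1, h2'⟩ | h
          · left
            refine ⟨?_, h2'⟩
            by_contra hc
            have hmi : i ≤ (pvMid l r).toNat := by omega
            have hge : p.toList ≤ (pvKeyN A p (pvMid l r).toNat).toList :=
              (le_of_eq (congrArg String.toList hi.2.symm)).trans (pvKeyN_mono A p hpre hmi (by omega))
            rw [hkey, String.lt_iff_toList_lt] at hklt
            exact absurd (lt_of_le_of_lt hge hklt) (lt_irrefl p.toList)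
          · exact Or.inr h
    · rw [if_neg hlr]
      exact pvDoneL A p hlr hres hcov

theorem pvLoopU_ind (A : List String) (p : String) (hpre : Pre_return_prefix A p) :
    ∀ (n : Nat) (l r res : Int), (r + 1 - l).toNat ≤ n → 0 ≤ l → r < (A.length : Int) →
    (res = -1 ∨ ∃ j, pvMatch A p j ∧ res = (j : Int) ∧ res < l) →
    (∀ i, pvMatch A p i → (l ≤ (i : Int) ∧ (i : Int) ≤ r) ∨ (res ≠ -1 ∧ (i : Int) ≤ res)) →
    pvIsLast A p (pvLoopU A p l r res) := by
  intro n
  induction n with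
  | zero =>
    intro l r res hn hl hr hres hcov
    have hlr : ¬ l ≤ r := by omega
    rw [pvLoopU, if_neg hlr]
    exact pvDoneU A p hlr hres hcov
  | succ n ih =>
    intro l r res hn hl hr hres hcov
    rw [pvLoopU]
    by_cases hlr : l ≤ r
    · rw [if_pos hlr]
      have hmid := pvMid_bounds hlr
      have hmid0 : 0 ≤ pvMid l r := by omega
      have hmidn : pvMid l r < (A.length : Int) := by omega
      have hkey : pvKey A p (pvMid l r) = pvKeyN A p (pvMid l r).toNat :=
        pvKey_eq_keyN A p (pvMid l r) hmid0 hmidn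
      by_cases hlt : p < pvKey A p (pvMid l r)
      · rw [if_pos hlt]
        refine ih l (pvMid l r - 1) res (by omega) hl (by omega) hres ?_
        intro i hi
        rcases hcov i hi with ⟨h1, h2'⟩ | h
        · left
          refine ⟨h1, ?_⟩
          by_contra hc
          have hmi : (pvMid l r).toNat ≤ i := by omega
          have hle : (pvKeyN A p (pvMid l r).toNat).toList ≤ p.toList :=
            (pvKeyN_mono A p hpre hmi hi.1).trans (le_of_eq (congrArg String.toList hi.2))
          rw [hkey, String.lt_iff_toList_lt] at hlt
          exact absurd (lt_of_lt_of_le hlt hle) (lt_irrefl p.toList)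
        · exact Or.inr h
      · rw [if_neg hlt]
        by_cases heq : p = pvKey A p (pvMid l r)
        · rw [if_pos heq]
          have hmatch : pvMatch A p (pvMid l r).toNat := ⟨by omega, by rw [← hkey, ← heq]⟩
          refine ih (pvMid l r + 1) r (pvMid l r) (by omega) (by omega) hr ?_ ?_
          · exact Or.inr ⟨(pvMid l r).toNat, hmatch, by omega, by omega⟩
          · intro i hi
            rcases hcov i hi with ⟨h1, h2'⟩ | ⟨hne, hle⟩
            · rcases Int.lt_or_le (pvMid l r) ((i : Int)) with hc | hc
              · exact Or.inl ⟨by omega, h2'⟩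
              · exact Or.inr ⟨by omega, hc⟩
            · right
              constructor
              · omega
              · rcases hres with h | ⟨j, hj, hje, hjr⟩
                · omega
                · omega
        · rw [if_neg heq]
          have hklt : pvKey A p (pvMid l r) < p :=
            lt_of_le_of_ne (not_lt.mp hlt) (fun h => heq h.symm)
          refine ih (pvMid l r + 1) r res (by omega) (by omega) hr ?_ ?_
          · rcases hres with h | ⟨j, hj, hje, hjr⟩
            · exact Or.inl h
            · exact Or.inr ⟨j, hj, hje, by omega⟩
          · intro i hi
            rcases hcov i hi with ⟨h1, h2'⟩ | h
            · left
              refine ⟨?_, h2'⟩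
              by_contra hc
              have hmi : i ≤ (pvMid l r).toNat := by omega
              have hge : p.toList ≤ (pvKeyN A p (pvMid l r).toNat).toList :=
                (le_of_eq (congrArg String.toList hi.2.symm)).trans (pvKeyN_mono A p hpre hmi (by omega))
              rw [hkey, String.lt_iff_toList_lt] at hklt
              exact absurd (lt_of_le_of_lt hge hklt) (lt_irrefl p.toList)
            · exact Or.inr h
    · rw [if_neg hlr]
      exact pvDoneU A p hlr hres hcov

-- B side: spec indices of the first / last match, as structural recursions
def pvFirstIdx (p : String) : List String → Option Nat
  | [] => none
  | x :: xs =>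
    if PySem.Str.slice x none (some (PySem.Str.len p)) = p then some 0
    else (pvFirstIdx p xs).map (· + 1)

def pvLastIdx (p : String) : List String → Option Nat
  | [] => none
  | x :: xs =>
    match pvLastIdx p xs with
    | some j => some (j + 1)
    | none => if PySem.Str.slice x none (some (PySem.Str.len p)) = p then some 0 else none

theorem pvMatch_cons_zero (x : String) (xs : List String) (p : String) :
    pvMatch (x :: xs) p 0 ↔ PySem.Str.slice x none (some (PySem.Str.len p)) = p := by
  simp [pvMatch, pvKeyN]

theorem pvMatch_cons_succ (x : String) (xs : List String) (p : String) (i : Nat) :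
    pvMatch (x :: xs) p (i + 1) ↔ pvMatch xs p i := by
  simp [pvMatch, pvKeyN]

theorem pvFirstIdx_cons (p x : String) (xs : List String) :
    pvFirstIdx p (x :: xs) =
      if PySem.Str.slice x none (some (PySem.Str.len p)) = p then some 0
      else (pvFirstIdx p xs).map (· + 1) := rfl

theorem pvLastIdx_cons_some (p x : String) (xs : List String) (j : Nat)
    (h : pvLastIdx p xs = some j) : pvLastIdx p (x :: xs) = some (j + 1) := by
  unfold pvLastIdx
  rw [h]

theorem pvLastIdx_cons_none (p x : String) (xs : List String)
    (h : pvLastIdx p xs = none) :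
    pvLastIdx p (x :: xs) =
      if PySem.Str.slice x none (some (PySem.Str.len p)) = p then some 0 else none := by
  unfold pvLastIdx
  rw [h]

def pvFold1 (s f0 : Int) (o : Option Nat) : Int :=
  o.elim f0 (fun j => if f0 = -1 then s + (j : Int) else f0)

def pvFold2 (s l0 : Int) (o : Option Nat) : Int :=
  o.elim l0 (fun j => s + (j : Int))

theorem pvFoldB (p : String) (xs : List String) :
    ∀ (s f0 l0 : Int), 0 ≤ s →
    (PySem.List.enumerate xs s).foldl
      (fun (acc : Int × Int) (is : Int × String) =>
        if PySem.Str.slice is.2 none (some (PySem.Str.len p)) = p then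
          ((if acc.1 = -1 then is.1 else acc.1), is.1)
        else acc) (f0, l0) =
    (pvFold1 s f0 (pvFirstIdx p xs), pvFold2 s l0 (pvLastIdx p xs)) := by
  induction xs with
  | nil => intro s f0 l0 hs; simp [pvFirstIdx, pvLastIdx, pvFold1, pvFold2]
  | cons x xs ih =>
    intro s f0 l0 hs
    rw [PySem.List.enumerate_cons]
    simp only [List.foldl_cons]
    by_cases hx : PySem.Str.slice x none (some (PySem.Str.len p)) = p
    · rw [if_pos hx, ih (s + 1) (if f0 = -1 then s else f0) s (by omega),
         pvFirstIdx_cons, if_pos hx]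
      cases hl : pvLastIdx p xs with
      | none =>
        rw [pvLastIdx_cons_none p x xs hl, if_pos hx]
        cases hf : pvFirstIdx p xs <;>
          simp [pvFold1, pvFold2, Option.elim, Prod.ext_iff] <;>
          (try split_ifs) <;> omega
      | some j =>
        rw [pvLastIdx_cons_some p x xs j hl]
        cases hf : pvFirstIdx p xs <;>
          simp [pvFold1, pvFold2, Option.elim, Prod.ext_iff] <;>
          (try split_ifs) <;> omega
    · rw [if_neg hx, ih (s + 1) f0 l0 (by omega), pvFirstIdx_cons, if_neg hx]
      cases hl : pvLastIdx p xs with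
      | none =>
        rw [pvLastIdx_cons_none p x xs hl, if_neg hx]
        cases hf : pvFirstIdx p xs <;>
          simp [pvFold1, pvFold2, Option.elim, Prod.ext_iff] <;>
          (try split_ifs) <;> omega
      | some j =>
        rw [pvLastIdx_cons_some p x xs j hl]
        cases hf : pvFirstIdx p xs <;>
          simp [pvFold1, pvFold2, Option.elim, Prod.ext_iff] <;>
          (try split_ifs) <;> omega

theorem pvFirstIdx_none (p : String) (xs : List String) (h : pvFirstIdx p xs = none) :
    ∀ i, ¬ pvMatch xs p i := by
  induction xs with
  | nil => intro i hi; exact absurd hi.1 (by simp)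
  | cons x xs ih =>
    intro i hi
    rw [pvFirstIdx_cons] at h
    by_cases hx : PySem.Str.slice x none (some (PySem.Str.len p)) = p
    · rw [if_pos hx] at h; simp at h
    · rw [if_neg hx, Option.map_eq_none_iff] at h
      cases i with
      | zero => exact hx ((pvMatch_cons_zero x xs p).mp hi)
      | succ i => exact ih h i ((pvMatch_cons_succ x xs p i).mp hi)

theorem pvFirstIdx_some (p : String) (xs : List String) (j : Nat)
    (h : pvFirstIdx p xs = some j) :
    pvMatch xs p j ∧ ∀ i, pvMatch xs p i → j ≤ i := by
  induction xs generalizing j with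
  | nil => simp [pvFirstIdx] at h
  | cons x xs ih =>
    rw [pvFirstIdx_cons] at h
    by_cases hx : PySem.Str.slice x none (some (PySem.Str.len p)) = p
    · rw [if_pos hx] at h
      obtain rfl : 0 = j := Option.some.inj h
      exact ⟨(pvMatch_cons_zero x xs p).mpr hx, fun i _ => Nat.zero_le i⟩
    · rw [if_neg hx, Option.map_eq_some_iff] at h
      obtain ⟨j', hj', rfl⟩ := h
      obtain ⟨hm, hmin⟩ := ih j' hj'
      refine ⟨(pvMatch_cons_succ x xs p j').mpr hm, fun i hi => ?_⟩
      cases i with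
      | zero => exact absurd ((pvMatch_cons_zero x xs p).mp hi) hx
      | succ i => exact Nat.succ_le_succ (hmin i ((pvMatch_cons_succ x xs p i).mp hi))

theorem pvLastIdx_none (p : String) (xs : List String) (h : pvLastIdx p xs = none) :
    ∀ i, ¬ pvMatch xs p i := by
  induction xs with
  | nil => intro i hi; exact absurd hi.1 (by simp)
  | cons x xs ih =>
    intro i hi
    cases hl : pvLastIdx p xs with
    | some j => rw [pvLastIdx_cons_some p x xs j hl] at h; simp at h
    | none =>
      rw [pvLastIdx_cons_none p x xs hl] at h
      by_cases hx : PySem.Str.slice x none (some (PySem.Str.len p)) = p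
      · rw [if_pos hx] at h; simp at h
      · cases i with
        | zero => exact hx ((pvMatch_cons_zero x xs p).mp hi)
        | succ i => exact ih hl i ((pvMatch_cons_succ x xs p i).mp hi)

theorem pvLastIdx_some (p : String) (xs : List String) (j : Nat)
    (h : pvLastIdx p xs = some j) :
    pvMatch xs p j ∧ ∀ i, pvMatch xs p i → i ≤ j := by
  induction xs generalizing j with
  | nil => simp [pvLastIdx] at h
  | cons x xs ih =>
    cases hl : pvLastIdx p xs with
    | some j' =>
      rw [pvLastIdx_cons_some p x xs j' hl] at h
      obtain rfl : j' + 1 = j := Option.some.inj h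
      obtain ⟨hm, hmax⟩ := ih j' hl
      refine ⟨(pvMatch_cons_succ x xs p j').mpr hm, fun i hi => ?_⟩
      cases i with
      | zero => exact Nat.zero_le _
      | succ i => exact Nat.succ_le_succ (hmax i ((pvMatch_cons_succ x xs p i).mp hi))
    | none =>
      rw [pvLastIdx_cons_none p x xs hl] at h
      by_cases hx : PySem.Str.slice x none (some (PySem.Str.len p)) = p
      · rw [if_pos hx] at h
        obtain rfl : 0 = j := Option.some.inj h
        refine ⟨(pvMatch_cons_zero x xs p).mpr hx, fun i hi => ?_⟩
        cases i with
        | zero => exact Nat.le_refl 0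
        | succ i => exact absurd ((pvMatch_cons_succ x xs p i).mp hi) (pvLastIdx_none p xs hl i)
      · rw [if_neg hx] at h; simp at h

theorem pvIsFirst_unique (A : List String) (p : String) {x y : Int}
    (hx : pvIsFirst A p x) (hy : pvIsFirst A p y) : x = y := by
  rcases hx with ⟨hx1, hx2⟩ | ⟨j, hj, hje, hjmin⟩
  · rcases hy with ⟨hy1, _⟩ | ⟨j, hj, _, _⟩
    · omega
    · exact absurd hj (hx2 j)
  · rcases hy with ⟨_, hy2⟩ | ⟨j', hj', hje', hjmin'⟩
    · exact absurd hj (hy2 j)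
    · have : j = j' := Nat.le_antisymm (hjmin j' hj') (hjmin' j hj)
      omega

theorem pvIsLast_unique (A : List String) (p : String) {x y : Int}
    (hx : pvIsLast A p x) (hy : pvIsLast A p y) : x = y := by
  rcases hx with ⟨hx1, hx2⟩ | ⟨j, hj, hje, hjmax⟩
  · rcases hy with ⟨hy1, _⟩ | ⟨j, hj, _, _⟩
    · omega
    · exact absurd hj (hx2 j)
  · rcases hy with ⟨_, hy2⟩ | ⟨j', hj', hje', hjmax'⟩
    · exact absurd hj (hy2 j)
    · have : j = j' := Nat.le_antisymm (hjmax' j hj) (hjmax j' hj')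
      omega

theorem pvAlt_first (A : List String) (p : String) :
    pvIsFirst A p ((return_prefix_alt A p).getD 0 0) := by
  simp only [return_prefix_alt]
  rw [pvFoldB p A 0 (-1) (-1) (by omega)]
  cases hf : pvFirstIdx p A with
  | none => exact Or.inl ⟨by simp [pvFold1, Option.elim], pvFirstIdx_none p A hf⟩
  | some j =>
    obtain ⟨hm, hmin⟩ := pvFirstIdx_some p A j hf
    exact Or.inr ⟨j, hm, by simp [pvFold1, Option.elim], hmin⟩

theorem pvAlt_last (A : List String) (p : String) :
    pvIsLast A p ((return_prefix_alt A p).getD 1 0) := by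
  simp only [return_prefix_alt]
  rw [pvFoldB p A 0 (-1) (-1) (by omega)]
  cases hl : pvLastIdx p A with
  | none => exact Or.inl ⟨by simp [pvFold2, Option.elim], pvLastIdx_none p A hl⟩
  | some j =>
    obtain ⟨hm, hmax⟩ := pvLastIdx_some p A j hl
    exact Or.inr ⟨j, hm, by simp [pvFold2, Option.elim], hmax⟩

theorem pvAlt_shape (A : List String) (p : String) :
    return_prefix_alt A p = [(return_prefix_alt A p).getD 0 0, (return_prefix_alt A p).getD 1 0] := by
  unfold return_prefix_alt
  simp

-- ===== VERDICT (by name: the statement is the Claim_ definition above) =====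
theorem return_prefix_spec : Claim_equal_return_prefix := by
  intro A p _hdom hpre
  unfold Spec_return_prefix
  have hL : pvIsFirst A p (pvLoopL A p 0 ((A.length : Int) - 1) (-1)) := by
    refine pvLoopL_ind A p hpre A.length 0 ((A.length : Int) - 1) (-1) (by omega) (by omega)
      (by omega) (Or.inl rfl) (fun i hi => Or.inl ⟨by omega, by have := hi.1; omega⟩)
  have hU : pvIsLast A p (pvLoopU A p 0 ((A.length : Int) - 1) (-1)) := by
    refine pvLoopU_ind A p hpre A.length 0 ((A.length : Int) - 1) (-1) (by omega) (by omega)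
      (by omega) (Or.inl rfl) (fun i hi => Or.inl ⟨by omega, by have := hi.1; omega⟩)
  rw [return_prefix, pvAlt_shape A p]
  rw [pvIsFirst_unique A p hL (pvAlt_first A p), pvIsLast_unique A p hU (pvAlt_last A p)]
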